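-- pv_equiv track=rewrite | github.com/lipingfangs/VAP | src/filiterthenotpairtrack.py | are_numbers_in_two_intervals
-- ===== SOURCE A (Python) =====
-- def are_numbers_in_two_intervals(number1, number2, intervals):
--     interval_number1 = None
--     interval_number2 = None
--
--     # 遍历区间集，检查每个数是否在每个区间内
--     for i, interval in enumerate(intervals):
--         if interval[0] <= number1 < interval[1]:
--             interval_number1 = i
--         if interval[0] <= number2 < interval[1]:
--             interval_number2 = i
--
--     # 如果两个数都在一个区间内，且这两个区间不同，则返回 True
--     return interval_number1 is not None and interval_number2 is not None and interval_number1 != interval_number2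
-- ===== SOURCE B (Python) =====
-- def are_numbers_in_two_intervals(number1, number2, intervals):
--     # Index-free: the last interval (in order) that contains either number decides.
--     # If it contains both, the two "last containing" intervals coincide -> False.
--     # If it contains exactly one, they differ iff the other number is covered at all.
--     for a, b in reversed(intervals):
--         in1 = a <= number1 < b
--         in2 = a <= number2 < b
--         if in1 or in2:
--             if in1 and in2:
--                 return False
--             other = number2 if in1 else number1
--             return any(a <= other < b for a, b in intervals)
--     return False
-- ===== Notes on version B (the rewrite author's own statement) =====
-- stated objective: alternative
-- what changed: Replaced A's index bookkeeping (one forward pass maintaining two last-match indices, then comparing them) by an index-free algorithm: scan reversed(intervals) for the first interval hitting either number; if it contains both return False, if it contains exactly one return whether the other number is covered by any interval at all.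
import Mathlib
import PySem

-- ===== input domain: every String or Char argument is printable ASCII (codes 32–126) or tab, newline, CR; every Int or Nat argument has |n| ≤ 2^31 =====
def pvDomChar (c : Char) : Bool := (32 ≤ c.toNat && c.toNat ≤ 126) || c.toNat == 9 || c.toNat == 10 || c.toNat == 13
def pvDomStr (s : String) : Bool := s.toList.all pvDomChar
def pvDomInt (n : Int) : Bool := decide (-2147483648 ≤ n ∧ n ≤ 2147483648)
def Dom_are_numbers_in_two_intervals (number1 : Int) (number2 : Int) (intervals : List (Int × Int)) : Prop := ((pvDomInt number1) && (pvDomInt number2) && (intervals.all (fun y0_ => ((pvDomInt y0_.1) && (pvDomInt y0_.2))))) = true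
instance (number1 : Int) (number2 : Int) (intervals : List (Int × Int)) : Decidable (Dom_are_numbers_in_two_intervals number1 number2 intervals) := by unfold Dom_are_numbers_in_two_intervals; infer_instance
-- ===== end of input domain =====

-- B removes A's index bookkeeping entirely: it scans the reversed intervals for the first one
-- hitting either number and decides from that interval plus one coverage check (objective: alternative).

-- ===== PORT A =====
-- A: one forward pass over enumerate(intervals), overwriting interval_number1/2 at each hit,
-- then `i1 is not None and i2 is not None and i1 != i2`.
def are_numbers_in_two_intervals (number1 : Int) (number2 : Int) (intervals : List (Int × Int)) : Bool :=
  let st := (PySem.List.enumerate intervals 0).foldl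
    (fun (st : Option Int × Option Int) q =>
      (if q.2.1 ≤ number1 ∧ number1 < q.2.2 then some q.1 else st.1,
       if q.2.1 ≤ number2 ∧ number2 < q.2.2 then some q.1 else st.2))
    (none, none)
  st.1.isSome && st.2.isSome && decide (st.1 ≠ st.2)

-- ===== PORT B =====
-- Source B's `any(a <= other < b for a, b in intervals)` coverage check, as a helper.
def pvCovers (x : Int) (intervals : List (Int × Int)) : Bool :=
  intervals.any (fun q => decide (q.1 ≤ x ∧ x < q.2))

-- Source B's `for a, b in reversed(intervals): …` loop, as structural recursion over intervals.reverse;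
-- `intervals` is passed along for the coverage check over the full list.
def pvRevLoop (number1 : Int) (number2 : Int) (intervals : List (Int × Int)) : List (Int × Int) → Bool
  | [] => false
  | p :: rest =>
    if decide (p.1 ≤ number1 ∧ number1 < p.2) || decide (p.1 ≤ number2 ∧ number2 < p.2) then
      if decide (p.1 ≤ number1 ∧ number1 < p.2) && decide (p.1 ≤ number2 ∧ number2 < p.2) then false
      else pvCovers (if p.1 ≤ number1 ∧ number1 < p.2 then number2 else number1) intervals
    else pvRevLoop number1 number2 intervals rest

def are_numbers_in_two_intervals_alt (number1 : Int) (number2 : Int) (intervals : List (Int × Int)) : Bool :=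
  pvRevLoop number1 number2 intervals intervals.reverse

-- ===== PRECONDITION & SPEC =====
def Spec_are_numbers_in_two_intervals (number1 : Int) (number2 : Int) (intervals : List (Int × Int)) (out : Bool) : Prop := out = are_numbers_in_two_intervals_alt number1 number2 intervals
instance (number1 : Int) (number2 : Int) (intervals : List (Int × Int)) (out : Bool) : Decidable (Spec_are_numbers_in_two_intervals number1 number2 intervals out) := by unfold Spec_are_numbers_in_two_intervals; infer_instance

-- ===== CLAIM (what is proved, stated in full; the proofs are below) =====
def Claim_equal_are_numbers_in_two_intervals : Prop := ∀ (number1 : Int) (number2 : Int) (intervals : List (Int × Int)), Dom_are_numbers_in_two_intervals number1 number2 intervals → Spec_are_numbers_in_two_intervals number1 number2 intervals (are_numbers_in_two_intervals number1 number2 intervals)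

-- ===== LEMMAS AND PROOFS =====

-- A's single last-match fold, named for the lemmas.
def pvLast (x : Int) (l : List (Int × (Int × Int))) (a : Option Int) : Option Int :=
  l.foldl (fun acc q => if q.2.1 ≤ x ∧ x < q.2.2 then some q.1 else acc) a

-- A's paired fold splits into two independent folds.
theorem pv_fold_pair (n1 n2 : Int) (l : List (Int × (Int × Int))) (a1 a2 : Option Int) :
    l.foldl (fun (st : Option Int × Option Int) q =>
      (if q.2.1 ≤ n1 ∧ n1 < q.2.2 then some q.1 else st.1,
       if q.2.1 ≤ n2 ∧ n2 < q.2.2 then some q.1 else st.2)) (a1, a2)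
    = (pvLast n1 l a1, pvLast n2 l a2) := by
  induction l generalizing a1 a2 with
  | nil => rfl
  | cons q l ih => simp only [pvLast, List.foldl] at *; rw [ih]

-- every index produced by the fold over enumerate l s is < s + len l
theorem pv_last_lt (x : Int) (l : List (Int × Int)) : ∀ (s : Int) (a : Option Int),
    (∀ k, a = some k → k < s) →
    ∀ k, pvLast x (PySem.List.enumerate l s) a = some k → k < s + l.length := by
  induction l with
  | nil =>
    intro s a ha k hk
    simp only [PySem.List.enumerate_nil, pvLast, List.foldl] at hk
    exact (ha k hk).trans_le (by simp)
  | cons q l ih =>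
    intro s a ha k hk
    rw [PySem.List.enumerate_cons] at hk
    have hk' : pvLast x (PySem.List.enumerate l (s + 1))
        (if q.1 ≤ x ∧ x < q.2 then some s else a) = some k := hk
    have h2 := ih (s + 1) _ (by
      intro j hj
      split at hj
      · cases hj; omega
      · exact (ha j hj).trans (by omega)) k hk'
    have : ((q :: l).length : Int) = (l.length : Int) + 1 := by simp
    omega

-- the fold is some iff the accumulator is or some interval covers x
theorem pv_last_isSome (x : Int) (l : List (Int × Int)) : ∀ (s : Int) (a : Option Int),
    (pvLast x (PySem.List.enumerate l s) a).isSome = (a.isSome || pvCovers x l) := by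
  induction l with
  | nil => intro s a; simp [pvLast, pvCovers, PySem.List.enumerate_nil]
  | cons q l ih =>
    intro s a
    rw [PySem.List.enumerate_cons]
    have h : pvLast x ((s, q) :: PySem.List.enumerate l (s + 1)) a
        = pvLast x (PySem.List.enumerate l (s + 1)) (if q.1 ≤ x ∧ x < q.2 then some s else a) := rfl
    rw [h, ih]
    by_cases hc : q.1 ≤ x ∧ x < q.2 <;> simp [pvCovers, hc, Bool.or_comm, Bool.or_left_comm]

theorem pvLast_append (x : Int) (l1 l2 : List (Int × (Int × Int))) (a : Option Int) :
    pvLast x (l1 ++ l2) a = pvLast x l2 (pvLast x l1 a) := List.foldl_append ..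

theorem pvCovers_append_one (x : Int) (l : List (Int × Int)) (p : Int × Int)
    (hp : ¬(p.1 ≤ x ∧ x < p.2)) : pvCovers x (l ++ [p]) = pvCovers x l := by
  simp [pvCovers, hp]

-- pvRevLoop only uses `intervals` through the coverage of number1 and number2
theorem pvRevLoop_congr (n1 n2 : Int) (iv iv' : List (Int × Int))
    (h1 : pvCovers n1 iv = pvCovers n1 iv') (h2 : pvCovers n2 iv = pvCovers n2 iv')
    (rest : List (Int × Int)) :
    pvRevLoop n1 n2 iv rest = pvRevLoop n1 n2 iv' rest := by
  induction rest with
  | nil => rfl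
  | cons p rest ih =>
    simp only [pvRevLoop, ih]
    by_cases c1 : p.1 ≤ n1 ∧ n1 < p.2 <;> by_cases c2 : p.1 ≤ n2 ∧ n2 < p.2 <;>
      simp [c1, c2, h1, h2]

-- core equivalence, by induction from the right
theorem pv_main (n1 n2 : Int) (intervals : List (Int × Int)) :
    are_numbers_in_two_intervals n1 n2 intervals
      = are_numbers_in_two_intervals_alt n1 n2 intervals := by
  unfold are_numbers_in_two_intervals are_numbers_in_two_intervals_alt
  rw [pv_fold_pair]
  show ((pvLast n1 (PySem.List.enumerate intervals 0) none).isSome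
      && (pvLast n2 (PySem.List.enumerate intervals 0) none).isSome
      && decide (pvLast n1 (PySem.List.enumerate intervals 0) none
                ≠ pvLast n2 (PySem.List.enumerate intervals 0) none))
    = pvRevLoop n1 n2 intervals intervals.reverse
  induction intervals using List.reverseRecOn with
  | nil => rfl
  | append_singleton l p ih =>
    rw [PySem.List.enumerate_append, pvLast_append, pvLast_append,
      List.reverse_append, List.reverse_singleton, List.singleton_append]
    have hsing : ∀ x a, pvLast x (PySem.List.enumerate [p] ((0 : Int) + l.length)) a
        = if p.1 ≤ x ∧ x < p.2 then some ((0 : Int) + l.length) else a := by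
      intro x a; rfl
    rw [hsing, hsing]
    simp only [pvRevLoop]
    by_cases c1 : p.1 ≤ n1 ∧ n1 < p.2 <;> by_cases c2 : p.1 ≤ n2 ∧ n2 < p.2
    · simp [c1, c2]
    · -- p covers n1 only
      have hs := pv_last_isSome n2 l 0 none
      have hcov := pvCovers_append_one n2 l p c2
      cases hi2 : pvLast n2 (PySem.List.enumerate l 0) none with
      | none =>
        rw [hi2] at hs
        have hc : pvCovers n2 l = false := by simpa using hs.symm
        simp [c1, c2, hcov, hc]
      | some k =>
        have hk := pv_last_lt n2 l 0 none (by simp) k hi2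
        rw [hi2] at hs
        have hc : pvCovers n2 l = true := by simpa using hs.symm
        have hne : (l.length : Int) ≠ k := by omega
        simp [c1, c2, hcov, hc, hne]
    · -- p covers n2 only
      have hs := pv_last_isSome n1 l 0 none
      have hcov := pvCovers_append_one n1 l p c1
      cases hi1 : pvLast n1 (PySem.List.enumerate l 0) none with
      | none =>
        rw [hi1] at hs
        have hc : pvCovers n1 l = false := by simpa using hs.symm
        simp [c1, c2, hcov, hc]
      | some k =>
        have hk := pv_last_lt n1 l 0 none (by simp) k hi1
        rw [hi1] at hs
        have hc : pvCovers n1 l = true := by simpa using hs.symm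
        have hne : k ≠ (l.length : Int) := by omega
        simp [c1, c2, hcov, hc, hne]
    · -- p covers neither: both sides reduce to the statement for l
      rw [pvRevLoop_congr n1 n2 (l ++ [p]) l
        (pvCovers_append_one n1 l p c1) (pvCovers_append_one n2 l p c2) l.reverse]
      simpa [c1, c2] using ih

-- ===== VERDICT (by name: the statement is the Claim_ definition above) =====
theorem are_numbers_in_two_intervals_spec : Claim_equal_are_numbers_in_two_intervals := by
  intro n1 n2 intervals _
  exact pv_main n1 n2 intervals
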